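-- pv_equiv track=rewrite | github.com/Aeilko/Advent-of-Code-2021 | day20/solution.py | get_val
-- ===== SOURCE A (Python) =====
-- def get_val(grid, base_x, base_y, outers):
--     r = ""
--     for y in range(base_y-1, base_y+2):
--         if y < 0 or y == len(grid):
--             r += "111" if outers else "000"
--         else:
--             for x in range(base_x-1, base_x+2):
--                 if x < 0 or x == len(grid[y]):
--                     r += "1" if outers else "0"
--                 else:
--                     r += "1" if grid[y][x] else "0"
--     return int(r, 2)
-- ===== SOURCE B (Python) =====
-- def _cell(grid, y, x, outers):
--     if 0 <= y < len(grid) and 0 <= x < len(grid[y]):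
--         return 1 if grid[y][x] else 0
--     return 1 if outers else 0
--
-- def get_val(grid, base_x, base_y, outers):
--     # build the 9-bit value back-to-front: start at the last neighborhood cell,
--     # add bit * weight with a doubling weight
--     val = 0
--     w = 1
--     for dy in (1, 0, -1):
--         for dx in (1, 0, -1):
--             val += _cell(grid, base_y + dy, base_x + dx, outers) * w
--             w *= 2
--     return val
-- ===== Notes on version B (the rewrite author's own statement) =====
-- stated objective: alternative
-- what changed: B builds the value back-to-front: it walks the nine neighborhood cells in reverse order via explicit offset tuples, reads each through a single in-bounds helper _cell, and sums bit*weight with a doubling weight, instead of A's forward string concatenation with a whole-row special case parsed by int(r,2).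
import Mathlib
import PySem

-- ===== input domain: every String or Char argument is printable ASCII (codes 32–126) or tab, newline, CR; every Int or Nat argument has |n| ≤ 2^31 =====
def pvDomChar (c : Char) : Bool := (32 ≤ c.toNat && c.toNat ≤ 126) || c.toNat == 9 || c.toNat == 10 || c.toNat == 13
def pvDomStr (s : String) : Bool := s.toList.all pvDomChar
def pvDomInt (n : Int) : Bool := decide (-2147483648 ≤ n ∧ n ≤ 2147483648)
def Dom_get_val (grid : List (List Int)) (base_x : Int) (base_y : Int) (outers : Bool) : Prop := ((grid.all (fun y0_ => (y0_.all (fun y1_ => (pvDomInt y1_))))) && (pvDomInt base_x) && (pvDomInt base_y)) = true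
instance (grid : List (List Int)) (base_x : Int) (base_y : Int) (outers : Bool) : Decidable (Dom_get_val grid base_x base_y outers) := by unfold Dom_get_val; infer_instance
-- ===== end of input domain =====

-- B builds the 9-bit value back-to-front (reverse cell order, bit*weight with a doubling
-- weight, one in-bounds helper) instead of A's forward string build parsed by int(r,2)
-- (objective: alternative decomposition, same cost).

-- ===== PORT A =====
-- hand port of int(r, 2): exact for strings of '0'/'1' digits, which is all A ever builds
def pvBits (s : List Char) : Int :=
  s.foldl (fun a c => a * 2 + (if c = '1' then (1 : Int) else 0)) 0

def get_val (grid : List (List Int)) (base_x : Int) (base_y : Int) (outers : Bool) : Int :=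
  let r : List Char :=
    (PySem.List.pyRange (base_y - 1) (base_y + 2) 1).foldl (fun r y =>
      if y < 0 ∨ y = (grid.length : Int) then
        r ++ (if outers then ['1', '1', '1'] else ['0', '0', '0'])
      else
        (PySem.List.pyRange (base_x - 1) (base_x + 2) 1).foldl (fun r x =>
          if x < 0 ∨ x = ((((PySem.List.pyGet? grid y).getD []).length : Int)) then
            r ++ [if outers then '1' else '0']
          else
            r ++ [if (PySem.List.pyGet? ((PySem.List.pyGet? grid y).getD []) x).getD 0 ≠ 0 then '1' else '0']) r) []
  pvBits r

-- ===== PORT B =====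
-- port of Source B's _cell helper
def pvCell (grid : List (List Int)) (y : Int) (x : Int) (outers : Bool) : Int :=
  if 0 ≤ y ∧ y < (grid.length : Int) ∧ 0 ≤ x ∧
      x < ((((PySem.List.pyGet? grid y).getD []).length : Int)) then
    if (PySem.List.pyGet? ((PySem.List.pyGet? grid y).getD []) x).getD 0 ≠ 0 then 1 else 0
  else if outers then 1 else 0

-- state (val, w); loops over the offset tuples (1, 0, -1) exactly as Source B does
def get_val_alt (grid : List (List Int)) (base_x : Int) (base_y : Int) (outers : Bool) : Int :=
  (([1, 0, -1] : List Int).foldl (fun (s : Int × Int) dy =>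
     ([1, 0, -1] : List Int).foldl (fun (s : Int × Int) dx =>
        (s.1 + pvCell grid (base_y + dy) (base_x + dx) outers * s.2, s.2 * 2)) s) ((0 : Int), (1 : Int))).1

-- ===== PRECONDITION & SPEC =====
-- Pre_ excludes exactly the inputs on which A raises IndexError: some inspected row index
-- y ∈ [base_y-1, base_y+1] with y > len(grid), or a valid row shorter than base_x+1, while
-- base_x+1 ≥ 0 (for base_x+1 < 0 the `x < 0` short-circuit means A never indexes grid[y]).
def Pre_get_val (grid : List (List Int)) (base_x : Int) (base_y : Int) (outers : Bool) : Prop :=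
  base_x + 1 < 0 ∨
    ((base_y + 1 < 0 ∨ base_y + 1 ≤ (grid.length : Int)) ∧
      ∀ y ∈ [base_y - 1, base_y, base_y + 1], 0 ≤ y → y < (grid.length : Int) →
        base_x + 1 ≤ ((((PySem.List.pyGet? grid y).getD []).length : Int)))
instance (grid : List (List Int)) (base_x : Int) (base_y : Int) (outers : Bool) : Decidable (Pre_get_val grid base_x base_y outers) := by unfold Pre_get_val; infer_instance

def pvWitness_get_val : List (List Int) × Int × Int × Bool := ([[1, 0], [0, 1]], 0, 0, false)

def Spec_get_val (grid : List (List Int)) (base_x : Int) (base_y : Int) (outers : Bool) (out : Int) : Prop := out = get_val_alt grid base_x base_y outers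
instance (grid : List (List Int)) (base_x : Int) (base_y : Int) (outers : Bool) (out : Int) : Decidable (Spec_get_val grid base_x base_y outers out) := by unfold Spec_get_val; infer_instance

-- ===== CLAIM (what is proved, stated in full; the proofs are below) =====
def Claim_equal_get_val : Prop := ∀ (grid : List (List Int)) (base_x : Int) (base_y : Int) (outers : Bool), Dom_get_val grid base_x base_y outers → Pre_get_val grid base_x base_y outers → Spec_get_val grid base_x base_y outers (get_val grid base_x base_y outers)

-- ===== LEMMAS AND PROOFS =====

theorem pvRange3 (a : Int) : PySem.List.pyRange (a - 1) (a + 2) 1 = [a - 1, a, a + 1] := by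
  rw [PySem.List.pyRange_one_cons (by omega)]
  rw [show a - 1 + 1 = a by ring, PySem.List.pyRange_one_cons (by omega)]
  rw [PySem.List.pyRange_one_cons (by omega)]
  rw [show a + 1 + 1 = a + 2 by ring, PySem.List.pyRange_one]
  simp

theorem pvBits_snoc (s : List Char) (c : Char) :
    pvBits (s ++ [c]) = pvBits s * 2 + (if c = '1' then 1 else 0) := by
  simp [pvBits, List.foldl_append]

-- A's unified per-cell bit equals B's _cell helper
theorem cell_eq (grid : List (List Int)) (y x : Int) (outers : Bool) :
    (if y < 0 ∨ (grid.length : Int) ≤ y ∨ x < 0 ∨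
        ((((PySem.List.pyGet? grid y).getD []).length : Int)) ≤ x then
      (if outers then (1 : Int) else 0)
    else
      if (PySem.List.pyGet? ((PySem.List.pyGet? grid y).getD []) x).getD 0 ≠ 0 then 1 else 0) =
    pvCell grid y x outers := by
  unfold pvCell
  by_cases h : 0 ≤ y ∧ y < (grid.length : Int) ∧ 0 ≤ x ∧
      x < ((((PySem.List.pyGet? grid y).getD []).length : Int))
  · rw [if_pos h, if_neg (by omega)]
  · rw [if_neg h, if_pos (by omega)]

-- one cell of A: appends one char; h matches A's test with the unified bounds test
theorem cell_step (grid : List (List Int)) (y x : Int) (outers : Bool) (s : List Char)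
    (h : (x < 0 ∨ x = ((((PySem.List.pyGet? grid y).getD []).length : Int))) ↔
         (y < 0 ∨ (grid.length : Int) ≤ y ∨ x < 0 ∨
           ((((PySem.List.pyGet? grid y).getD []).length : Int)) ≤ x)) :
    pvBits ((if x < 0 ∨ x = ((((PySem.List.pyGet? grid y).getD []).length : Int)) then
              s ++ [if outers then '1' else '0']
            else
              s ++ [if (PySem.List.pyGet? ((PySem.List.pyGet? grid y).getD []) x).getD 0 ≠ 0 then '1' else '0'])) =
    pvBits s * 2 + pvCell grid y x outers := by
  rw [← cell_eq grid y x outers]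
  by_cases hc : x < 0 ∨ x = ((((PySem.List.pyGet? grid y).getD []).length : Int))
  · rw [if_pos hc, if_pos (h.mp hc), pvBits_snoc]
    cases outers <;> simp
  · rw [if_neg hc, if_neg (fun hb => hc (h.mpr hb)), pvBits_snoc]
    by_cases hd : (PySem.List.pyGet? ((PySem.List.pyGet? grid y).getD []) x).getD 0 ≠ 0 <;> simp [hd]

-- one row of A: three cells, as pvCell bits
theorem row_step (grid : List (List Int)) (base_x y : Int) (outers : Bool) (s : List Char)
    (hy : y < 0 ∨ y ≤ (grid.length : Int) ∨ base_x + 1 < 0)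
    (hx : 0 ≤ y → y < (grid.length : Int) →
      base_x + 1 < 0 ∨ base_x + 1 ≤ ((((PySem.List.pyGet? grid y).getD []).length : Int))) :
    pvBits ((if y < 0 ∨ y = (grid.length : Int) then
              s ++ (if outers then ['1', '1', '1'] else ['0', '0', '0'])
            else
              (PySem.List.pyRange (base_x - 1) (base_x + 2) 1).foldl (fun r x =>
                if x < 0 ∨ x = ((((PySem.List.pyGet? grid y).getD []).length : Int)) then
                  r ++ [if outers then '1' else '0']
                else
                  r ++ [if (PySem.List.pyGet? ((PySem.List.pyGet? grid y).getD []) x).getD 0 ≠ 0 then '1' else '0']) s)) =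
    ((pvBits s * 2 + pvCell grid y (base_x - 1) outers) * 2 + pvCell grid y base_x outers) * 2
      + pvCell grid y (base_x + 1) outers := by
  by_cases hr : y < 0 ∨ y = (grid.length : Int)
  · rw [if_pos hr]
    have ho : ∀ x : Int, pvCell grid y x outers = (if outers then 1 else 0) := by
      intro x
      rw [← cell_eq grid y x outers]
      rcases hr with h | h
      · rw [if_pos (Or.inl h)]
      · rw [if_pos (Or.inr (Or.inl (le_of_eq h.symm)))]
    rw [show (s ++ (if outers then ['1','1','1'] else ['0','0','0'])) =
        ((s ++ [if outers then '1' else '0']) ++ [if outers then '1' else '0']) ++ [if outers then '1' else '0'] by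
      cases outers <;> simp]
    rw [pvBits_snoc, pvBits_snoc, pvBits_snoc, ho, ho, ho]
    cases outers <;> simp
  · rw [if_neg hr, pvRange3]
    have hmatch : ∀ x ∈ [base_x - 1, base_x, base_x + 1],
        ((x < 0 ∨ x = ((((PySem.List.pyGet? grid y).getD []).length : Int))) ↔
         (y < 0 ∨ (grid.length : Int) ≤ y ∨ x < 0 ∨
           ((((PySem.List.pyGet? grid y).getD []).length : Int)) ≤ x)) := by
      intro x hxm
      push_neg at hr
      have hxr : x ≤ base_x + 1 := by
        simp only [List.mem_cons, List.mem_singleton, List.not_mem_nil, or_false] at hxm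
        rcases hxm with h | h | h <;> omega
      by_cases hneg : base_x + 1 < 0
      · constructor <;> intro _ <;> [skip; exact Or.inl (by omega)] <;>
          exact Or.inr (Or.inr (Or.inl (by omega)))
      · have hyv : 0 ≤ y ∧ y < (grid.length : Int) := by
          rcases hy with h | h | h <;> first | omega | exact ⟨by omega, lt_of_le_of_ne h hr.2⟩
        have hw := hx hyv.1 hyv.2
        constructor
        · rintro (h | h)
          · exact Or.inr (Or.inr (Or.inl h))
          · exact Or.inr (Or.inr (Or.inr (le_of_eq h.symm)))
        · rintro (h | h | h | h)
          · omega
          · omega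
          · exact Or.inl h
          · exact Or.inr (by omega)
    simp only [List.foldl]
    rw [cell_step _ _ _ _ _ (hmatch _ (by simp)),
        cell_step _ _ _ _ _ (hmatch _ (by simp)),
        cell_step _ _ _ _ _ (hmatch _ (by simp))]

-- ===== VERDICT (by name: the statement is the Claim_ definition above) =====
theorem get_val_spec : Claim_equal_get_val := by
  intro grid base_x base_y outers _ hpre
  have hy : ∀ y ∈ [base_y - 1, base_y, base_y + 1],
      y < 0 ∨ y ≤ (grid.length : Int) ∨ base_x + 1 < 0 := by
    intro y hym
    simp only [List.mem_cons, List.mem_singleton, List.not_mem_nil, or_false] at hym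
    rcases hpre with h | ⟨h1 | h1, _⟩
    · exact Or.inr (Or.inr h)
    · left; rcases hym with h' | h' | h' <;> omega
    · right; left; rcases hym with h' | h' | h' <;> omega
  have hx : ∀ y ∈ [base_y - 1, base_y, base_y + 1], 0 ≤ y → y < (grid.length : Int) →
      base_x + 1 < 0 ∨ base_x + 1 ≤ ((((PySem.List.pyGet? grid y).getD []).length : Int)) := by
    intro y hym h0 h1
    rcases hpre with h | ⟨_, h2⟩
    · exact Or.inl h
    · exact Or.inr (h2 y hym h0 h1)
  unfold Spec_get_val get_val get_val_alt
  rw [pvRange3 base_y]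
  simp only [List.foldl]
  rw [row_step grid base_x (base_y + 1) outers _ (hy _ (by simp)) (hx _ (by simp)),
      row_step grid base_x base_y outers _ (hy _ (by simp)) (hx _ (by simp)),
      row_step grid base_x (base_y - 1) outers _ (hy _ (by simp)) (hx _ (by simp))]
  simp only [pvBits, List.foldl]
  ring_nf
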